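-- pv_equiv track=rewrite | github.com/husseinelkheshen/ItinGen | activities_data/yelp/validation.py | validate_hours
-- ===== SOURCE A (Python) =====
-- def validate_open_hour(bizdict):
--     days = ['mon_start', 'tues_start', 'wed_start', 'thurs_start', 'fri_start',
--         'sat_start', 'sun_start']
--     for day in days:
--         if (day not in bizdict):
--             return False
--         hour = bizdict[day]
--         if (not isinstance(hour, int)):
--             return False
--         if (hour < 0 or hour > 1440):
--             return False
--     return True
--
-- def validate_close_hour(bizdict):
--     days = ['mon_end', 'tues_end', 'wed_end', 'thurs_end', 'fri_end',
--         'sat_end', 'sun_end']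
--     for day in days:
--         if (day not in bizdict):
--             return False
--         hour = bizdict[day]
--         if (not isinstance(hour, int)):
--             return False
--         if (hour < 0 or hour > 1440):
--             return False
--     return True
--
-- def validate_hours(bizdict):
--     if (not validate_open_hour(bizdict) or not validate_close_hour(bizdict)):
--         return False
--     open_hours = [bizdict['mon_start'],
--                     bizdict['tues_start'],
--                     bizdict['wed_start'],
--                     bizdict['thurs_start'],
--                     bizdict['fri_start'],
--                     bizdict['sat_start'],
--                     bizdict['sun_start']]
--     close_hours = [bizdict['mon_end'],
--                     bizdict['tues_end'],
--                     bizdict['wed_end'],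
--                     bizdict['thurs_end'],
--                     bizdict['fri_end'],
--                     bizdict['sat_end'],
--                     bizdict['sun_end']]
--     for day in range(7):
--         start = open_hours[day]
--         end = close_hours[day]
--         if (start > end):
--             return False
--     return True
-- ===== SOURCE B (Python) =====
-- def validate_hours(bizdict):
--     pairs = [('mon_start', 'mon_end'), ('tues_start', 'tues_end'),
--              ('wed_start', 'wed_end'), ('thurs_start', 'thurs_end'),
--              ('fri_start', 'fri_end'), ('sat_start', 'sat_end'),
--              ('sun_start', 'sun_end')]
--     for s_key, e_key in pairs:
--         if s_key not in bizdict or e_key not in bizdict: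
--             return False
--         start = bizdict[s_key]
--         end = bizdict[e_key]
--         if not isinstance(start, int) or not isinstance(end, int):
--             return False
--         if start < 0 or start > 1440 or end < 0 or end > 1440:
--             return False
--         if start > end:
--             return False
--     return True
-- ===== Notes on version B (the rewrite author's own statement) =====
-- stated objective: simpler
-- what changed: Replaces A's two key-list validation helpers plus a separate parallel-lists ordering pass with a single loop over the seven (start_key, end_key) pairs that validates presence, type, range and ordering per day in one place.
import Mathlib
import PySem

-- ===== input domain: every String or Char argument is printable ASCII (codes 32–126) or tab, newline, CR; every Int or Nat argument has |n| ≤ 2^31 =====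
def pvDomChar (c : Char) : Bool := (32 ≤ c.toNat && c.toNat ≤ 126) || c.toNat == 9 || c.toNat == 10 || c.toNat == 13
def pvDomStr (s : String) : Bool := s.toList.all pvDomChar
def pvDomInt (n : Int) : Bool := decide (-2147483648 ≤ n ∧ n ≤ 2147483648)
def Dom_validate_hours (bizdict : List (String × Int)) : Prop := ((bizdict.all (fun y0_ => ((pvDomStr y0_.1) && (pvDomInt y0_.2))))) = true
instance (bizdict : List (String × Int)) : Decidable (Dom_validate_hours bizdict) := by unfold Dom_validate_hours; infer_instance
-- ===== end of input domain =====

-- B replaces A's two key-list validation helpers plus a separate ordering pass over parallel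
-- lists by one loop over the seven (start_key, end_key) pairs (objective: simpler).
-- Note: the values are Int by the type convention, so Python's isinstance(h, int) test is
-- always true here and has no separate branch in the ports.

-- ===== PORT A =====
-- dict membership / lookup primitive shared by both ports (Python dict semantics)
def pvLook (bizdict : List (String × Int)) (k : String) : Option Int :=
  (PySem.Dict.mk bizdict).get? k

-- validate_open_hour's loop over its day list
def pvChkDays (bizdict : List (String × Int)) : List String → Bool
  | [] => true
  | day :: rest =>
    match pvLook bizdict day with
    | none => false                    -- day not in bizdict
    | some hour =>
      if hour < 0 || hour > 1440 then false
      else pvChkDays bizdict rest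

def validate_open_hour (bizdict : List (String × Int)) : Bool :=
  pvChkDays bizdict ["mon_start", "tues_start", "wed_start", "thurs_start", "fri_start",
    "sat_start", "sun_start"]

def validate_close_hour (bizdict : List (String × Int)) : Bool :=
  pvChkDays bizdict ["mon_end", "tues_end", "wed_end", "thurs_end", "fri_end",
    "sat_end", "sun_end"]

-- the 'for day in range(7)' comparison loop; indexing reads are guarded by the helpers
-- having returned True, so the getD default is never the returned lookup
def pvChkOrder (open_hours close_hours : List Int) : List Int → Bool
  | [] => true
  | day :: rest =>
    let start := PySem.List.pyGetD open_hours day 0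
    let «end» := PySem.List.pyGetD close_hours day 0
    if start > «end» then false
    else pvChkOrder open_hours close_hours rest

def validate_hours (bizdict : List (String × Int)) : Bool :=
  if !validate_open_hour bizdict || !validate_close_hour bizdict then false
  else
    let open_hours := [(pvLook bizdict "mon_start").getD 0,
                       (pvLook bizdict "tues_start").getD 0,
                       (pvLook bizdict "wed_start").getD 0,
                       (pvLook bizdict "thurs_start").getD 0,
                       (pvLook bizdict "fri_start").getD 0,
                       (pvLook bizdict "sat_start").getD 0,
                       (pvLook bizdict "sun_start").getD 0]
    let close_hours := [(pvLook bizdict "mon_end").getD 0,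
                        (pvLook bizdict "tues_end").getD 0,
                        (pvLook bizdict "wed_end").getD 0,
                        (pvLook bizdict "thurs_end").getD 0,
                        (pvLook bizdict "fri_end").getD 0,
                        (pvLook bizdict "sat_end").getD 0,
                        (pvLook bizdict "sun_end").getD 0]
    pvChkOrder open_hours close_hours (PySem.List.pyRange 0 7 1)

-- ===== PORT B =====
-- one loop over the seven (start_key, end_key) pairs
def pvChkPairs (bizdict : List (String × Int)) : List (String × String) → Bool
  | [] => true
  | (s_key, e_key) :: rest =>
    match pvLook bizdict s_key, pvLook bizdict e_key with
    | some start, some «end» =>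
      if start < 0 || start > 1440 || «end» < 0 || «end» > 1440 then false
      else if start > «end» then false
      else pvChkPairs bizdict rest
    | _, _ => false                    -- s_key or e_key not in bizdict

def validate_hours_alt (bizdict : List (String × Int)) : Bool :=
  pvChkPairs bizdict
    [("mon_start", "mon_end"), ("tues_start", "tues_end"),
     ("wed_start", "wed_end"), ("thurs_start", "thurs_end"),
     ("fri_start", "fri_end"), ("sat_start", "sat_end"),
     ("sun_start", "sun_end")]

-- ===== PRECONDITION & SPEC =====
def Spec_validate_hours (bizdict : List (String × Int)) (out : Bool) : Prop := out = validate_hours_alt bizdict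
instance (bizdict : List (String × Int)) (out : Bool) : Decidable (Spec_validate_hours bizdict out) := by unfold Spec_validate_hours; infer_instance

-- ===== CLAIM (what is proved, stated in full; the proofs are below) =====
def Claim_equal_validate_hours : Prop := ∀ (bizdict : List (String × Int)), Dom_validate_hours bizdict → Spec_validate_hours bizdict (validate_hours bizdict)

-- ===== LEMMAS AND PROOFS =====
theorem pvRange7 : PySem.List.pyRange 0 7 1 = [0, 1, 2, 3, 4, 5, 6] := by decide

-- per-key check: key present and value in [0, 1440]
def pvChk1 (d : List (String × Int)) (k : String) : Bool :=
  match pvLook d k with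
  | none => false
  | some h => !(h < 0 || h > 1440)

-- per-day ordering check on the looked-up values
def pvOrd (d : List (String × Int)) (s e : String) : Bool :=
  !((pvLook d s).getD 0 > (pvLook d e).getD 0)

theorem pvChkDays_cons (d : List (String × Int)) (k : String) (ks : List String) :
    pvChkDays d (k :: ks) = (pvChk1 d k && pvChkDays d ks) := by
  cases h : pvLook d k <;> simp [pvChkDays, pvChk1, h]

theorem pvChkOrder_cons (op cl : List Int) (i : Int) (is : List Int) :
    pvChkOrder op cl (i :: is) =
      (!(PySem.List.pyGetD op i 0 > PySem.List.pyGetD cl i 0) && pvChkOrder op cl is) := by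
  simp [pvChkOrder]

theorem pvChkPairs_cons (d : List (String × Int)) (s e : String) (ps : List (String × String)) :
    pvChkPairs d ((s, e) :: ps) =
      (pvChk1 d s && pvChk1 d e && pvOrd d s e && pvChkPairs d ps) := by
  cases hs : pvLook d s <;> cases he : pvLook d e <;>
    simp [pvChkPairs, pvChk1, pvOrd, hs, he, Bool.and_assoc]

theorem pvChkDays_nil (d : List (String × Int)) : pvChkDays d [] = true := rfl

theorem pvChkOrder_nil (op cl : List Int) : pvChkOrder op cl [] = true := rfl

theorem pvChkPairs_nil (d : List (String × Int)) : pvChkPairs d [] = true := rfl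

-- the guard 'if not open or not close: return False' as a Bool conjunction
theorem pvIf_bool (a b : Bool) (x : Bool) :
    (if ((!a || !b) = true) then false else x) = (a && b && x) := by
  cases a <;> cases b <;> simp

-- ===== VERDICT (by name: the statement is the Claim_ definition above) =====
theorem validate_hours_spec : Claim_equal_validate_hours := by
  intro d _
  show validate_hours d = validate_hours_alt d
  simp only [validate_hours, validate_hours_alt, validate_open_hour, validate_close_hour,
    pvRange7, pvChkDays_cons, pvChkOrder_cons, pvChkPairs_cons, pvChkDays_nil, pvChkOrder_nil,
    pvChkPairs_nil, pvIf_bool, pvOrd, pysem]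
  rw [Bool.eq_iff_iff]
  simp [Bool.and_eq_true, not_lt]
  tauto
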